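-- pv_equiv track=rewrite | github.com/STABLE-TURBO/NeuralDBG | neural/parser/network_processors.py | merge_layer_params
-- ===== SOURCE A (Python) =====
-- from typing import Dict, Any, List
--
-- def merge_layer_params(ordered_params: List[Any], named_params: Dict[str, Any],
--                        param_mapping: Dict[int, str]) -> Dict[str, Any]:
--     """Merge ordered and named parameters for a layer.
--
--     Args:
--         ordered_params: List of positional parameters
--         named_params: Dictionary of named parameters
--         param_mapping: Mapping from position index to parameter name
--
--     Returns:
--         Merged parameter dictionary
--     """
--     params = {}
--
--     # Map positional parameters
--     for idx, value in enumerate(ordered_params):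
--         if idx in param_mapping:
--             params[param_mapping[idx]] = value
--
--     # Merge named parameters (overrides positional)
--     params.update(named_params)
--
--     return params
-- ===== SOURCE B (Python) =====
-- def merge_layer_params(ordered_params, named_params, param_mapping):
--     """Drive the merge from the mapping side: visit its keys in sorted order,
--     index into ordered_params for in-range keys, then let named override."""
--     n = len(ordered_params)
--     params = {}
--     for idx in sorted(param_mapping):
--         if 0 <= idx < n:
--             params[param_mapping[idx]] = ordered_params[idx]
--     params.update(named_params)
--     return params
-- ===== Notes on version B (the rewrite author's own statement) =====
-- stated objective: alternative
-- what changed: B drives the merge from the mapping side: it iterates the mapping's keys in sorted order and indexes into ordered_params for in-range keys, instead of enumerating ordered_params and membership-testing the mapping; named_params still overrides afterwards.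
import Mathlib
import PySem

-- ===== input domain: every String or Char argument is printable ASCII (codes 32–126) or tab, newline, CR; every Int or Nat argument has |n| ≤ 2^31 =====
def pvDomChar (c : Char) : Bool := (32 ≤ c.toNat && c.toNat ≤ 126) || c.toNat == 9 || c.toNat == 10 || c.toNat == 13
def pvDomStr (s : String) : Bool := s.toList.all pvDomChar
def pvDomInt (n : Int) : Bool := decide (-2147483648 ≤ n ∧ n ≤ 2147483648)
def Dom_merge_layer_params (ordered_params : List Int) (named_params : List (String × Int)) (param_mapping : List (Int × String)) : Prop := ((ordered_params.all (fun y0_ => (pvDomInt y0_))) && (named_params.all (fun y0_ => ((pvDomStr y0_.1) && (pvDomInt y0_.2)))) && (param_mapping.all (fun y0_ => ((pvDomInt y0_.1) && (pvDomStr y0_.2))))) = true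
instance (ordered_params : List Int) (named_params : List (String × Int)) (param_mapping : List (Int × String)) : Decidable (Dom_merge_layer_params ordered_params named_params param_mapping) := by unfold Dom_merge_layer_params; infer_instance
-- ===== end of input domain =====

-- B merges from the mapping side (sorted keys indexing into the list) instead of
-- enumerating the list and membership-testing the mapping; same result, alternative decomposition.

-- ===== PORT A =====
def merge_layer_params (ordered_params : List Int) (named_params : List (String × Int)) (param_mapping : List (Int × String)) : List (String × Int) :=
  let pm := PySem.Dict.ofList param_mapping
  let params := (PySem.List.enumerate ordered_params).foldl
    (fun d (p : Int × Int) =>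
      match pm.get? p.1 with
      | some name => d.insert name p.2
      | none => d)
    PySem.Dict.empty
  (params.update named_params).items

-- ===== PORT B =====
def merge_layer_params_alt (ordered_params : List Int) (named_params : List (String × Int)) (param_mapping : List (Int × String)) : List (String × Int) :=
  let n : Int := ordered_params.length
  let pm := PySem.Dict.ofList param_mapping
  let params := (PySem.List.sorted pm.keys (fun x => x) false).foldl
    (fun d (idx : Int) =>
      if 0 ≤ idx ∧ idx < n then
        d.insert (pm.getD idx "") (PySem.List.pyGetD ordered_params idx 0)
      else d)
    PySem.Dict.empty
  (params.update named_params).items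

-- ===== PRECONDITION & SPEC =====
def Spec_merge_layer_params (ordered_params : List Int) (named_params : List (String × Int)) (param_mapping : List (Int × String)) (out : List (String × Int)) : Prop := out = merge_layer_params_alt ordered_params named_params param_mapping
instance (ordered_params : List Int) (named_params : List (String × Int)) (param_mapping : List (Int × String)) (out : List (String × Int)) : Decidable (Spec_merge_layer_params ordered_params named_params param_mapping out) := by unfold Spec_merge_layer_params; infer_instance

-- ===== CLAIM (what is proved, stated in full; the proofs are below) =====
def Claim_equal_merge_layer_params : Prop := ∀ (ordered_params : List Int) (named_params : List (String × Int)) (param_mapping : List (Int × String)), Dom_merge_layer_params ordered_params named_params param_mapping → Spec_merge_layer_params ordered_params named_params param_mapping (merge_layer_params ordered_params named_params param_mapping)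

-- ===== LEMMAS AND PROOFS =====

-- two strictly increasing integer lists with the same members are equal
theorem pv_eq_of_sorted_lt_of_mem_iff :
    ∀ (l1 l2 : List Int), l1.Pairwise (· < ·) → l2.Pairwise (· < ·) →
      (∀ x, x ∈ l1 ↔ x ∈ l2) → l1 = l2 := by
  intro l1 l2 h1 h2 hm
  have n1 : l1.Nodup := h1.imp (fun h => ne_of_lt h)
  have n2 : l2.Nodup := h2.imp (fun h => ne_of_lt h)
  have hperm : l1.Perm l2 := (List.perm_ext_iff_of_nodup n1 n2).2 hm
  exact List.Perm.eq_of_pairwise (fun a b _ _ ha hb => le_antisymm ha hb)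
    (h1.imp le_of_lt) (h2.imp le_of_lt) hperm

-- the index sequences the two loops process are the same strictly increasing list
theorem pv_index_lists_eq (ordered_params : List Int) (pm : PySem.Dict Int String)
    (hk : pm.keys.Nodup) :
    (PySem.List.pyRange 0 (ordered_params.length : Int) 1).filter (fun j => pm.contains j)
      = (PySem.List.sorted pm.keys (fun x => x) false).filter
          (fun idx => decide (0 ≤ idx ∧ idx < (ordered_params.length : Int))) := by
  apply pv_eq_of_sorted_lt_of_mem_iff
  · exact (PySem.List.pairwise_lt_pyRange_one 0 _).filter _
  · have hs : (PySem.List.sorted pm.keys (fun x => x) false).Pairwise (· ≤ ·) :=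
      PySem.List.sorted_pairwise pm.keys (fun x => x)
    have hn : (PySem.List.sorted pm.keys (fun x => x) false).Nodup :=
      (PySem.List.sorted_perm pm.keys (fun x => x) false).nodup_iff.2 hk
    exact ((hs.and hn).imp (fun h => lt_of_le_of_ne h.1 h.2)).filter _
  · intro x
    simp [List.mem_filter, PySem.List.mem_pyRange_one, PySem.List.mem_sorted,
      PySem.Dict.contains_iff_mem_keys]
    tauto

-- the two positional-parameter loops build the same dict
theorem pv_pos_dicts_eq (ordered_params : List Int) (param_mapping : List (Int × String)) :
    (PySem.List.enumerate ordered_params).foldl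
      (fun d (p : Int × Int) =>
        match (PySem.Dict.ofList param_mapping).get? p.1 with
        | some name => d.insert name p.2
        | none => d)
      PySem.Dict.empty
    = (PySem.List.sorted (PySem.Dict.ofList param_mapping).keys (fun x => x) false).foldl
      (fun d (idx : Int) =>
        if 0 ≤ idx ∧ idx < (ordered_params.length : Int) then
          d.insert ((PySem.Dict.ofList param_mapping).getD idx "")
            (PySem.List.pyGetD ordered_params idx 0)
        else d)
      PySem.Dict.empty := by
  set pm := PySem.Dict.ofList param_mapping with hpm
  -- A's loop: a fold over pyRange with a boolean guard
  rw [PySem.List.enumerate_eq_map_pyRange (d := 0), List.foldl_map]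
  have hA : ∀ (d : PySem.Dict String Int) (j : Int),
      (match pm.get? j with
        | some name => d.insert name (PySem.List.pyGetD ordered_params j 0)
        | none => d)
      = if pm.contains j then
          d.insert (pm.getD j "") (PySem.List.pyGetD ordered_params j 0)
        else d := by
    intro d j
    rcases h : pm.get? j with _ | name
    · simp [PySem.Dict.contains_eq_isSome_get?, h]
    · simp [PySem.Dict.contains_eq_isSome_get?, h, PySem.Dict.getD_eq_get?_getD]
  -- B's loop: the Prop guard as a Bool guard
  have hB : ∀ (d : PySem.Dict String Int) (idx : Int),
      (if 0 ≤ idx ∧ idx < (ordered_params.length : Int) then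
          d.insert (pm.getD idx "") (PySem.List.pyGetD ordered_params idx 0)
        else d)
      = if decide (0 ≤ idx ∧ idx < (ordered_params.length : Int)) then
          d.insert (pm.getD idx "") (PySem.List.pyGetD ordered_params idx 0)
        else d := by
    intro d idx
    by_cases h : 0 ≤ idx ∧ idx < (ordered_params.length : Int) <;> simp [h]
  simp only [hA, hB, PySem.List.len_eq]
  -- guarded folds are folds over the filtered index lists
  rw [← List.foldl_filter, ← List.foldl_filter,
    pv_index_lists_eq ordered_params pm (PySem.Dict.nodup_keys_ofList param_mapping)]

-- ===== VERDICT (by name: the statement is the Claim_ definition above) =====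
theorem merge_layer_params_spec : Claim_equal_merge_layer_params := by
  intro ordered_params named_params param_mapping _
  unfold Spec_merge_layer_params merge_layer_params merge_layer_params_alt
  simp only []
  rw [pv_pos_dicts_eq]
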